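-- pv_equiv track=rewrite | github.com/JoaoGabrielTN/SimpleTools | bibma.py | check_extension
-- ===== SOURCE A (Python) =====
-- def check_extension(path: str):
--     extension = ''
--     index = -1
--     tail = path[index]
--     while tail != '.':
--         extension = tail + extension
--         index -= 1
--         tail=path[index]
--     return extension
-- ===== SOURCE B (Python) =====
-- def check_extension(path: str):
--     return path[path.rfind('.') + 1:]
-- ===== Notes on version B (the rewrite author's own statement) =====
-- stated objective: idiomatic
-- what changed: Replaces A's explicit backward character-by-character walk with accumulator by a single idiomatic expression: slice the string after the last dot found by str.rfind.
-- outside the precondition, e.g. on check_extension('noext'): A raises IndexError, B returns 'noext'; on check_extension(''): A raises IndexError, B returns ''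
import Mathlib
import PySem

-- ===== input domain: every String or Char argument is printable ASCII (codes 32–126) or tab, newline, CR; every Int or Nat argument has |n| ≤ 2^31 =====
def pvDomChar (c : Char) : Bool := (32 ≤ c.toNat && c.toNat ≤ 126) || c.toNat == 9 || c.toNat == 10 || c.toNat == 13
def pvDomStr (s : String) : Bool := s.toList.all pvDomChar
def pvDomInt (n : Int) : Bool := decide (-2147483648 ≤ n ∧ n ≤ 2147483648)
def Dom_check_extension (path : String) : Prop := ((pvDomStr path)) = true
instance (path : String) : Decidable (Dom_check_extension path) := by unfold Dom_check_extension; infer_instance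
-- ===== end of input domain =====

-- B replaces A's explicit backward walk with accumulator by the idiomatic one-liner
-- path[path.rfind('.') + 1:]; same values wherever A returns (A raises on dotless paths, excluded by Pre_).

-- ===== PORT A =====
-- A's while loop reads path[-1], path[-2], …: i.e. it consumes path.toList.reverse from
-- the front, prepending each char to the accumulator until it meets '.'.
def checkExtGo : List Char → List Char → List Char
  | [], acc => acc            -- here Python's path[index] raises IndexError (excluded by Pre_)
  | t :: rest, acc => if t = '.' then acc else checkExtGo rest (t :: acc)

def check_extension (path : String) : String :=
  String.mk (checkExtGo path.toList.reverse [])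

-- ===== PORT B =====
-- Source B: return path[path.rfind('.') + 1:]
def check_extension_alt (path : String) : String :=
  String.mk (PySem.List.slice path.toList (some (PySem.Str.rfind path "." + 1)) none)

-- ===== PRECONDITION & SPEC =====
-- Pre_ excludes exactly the inputs on which A raises IndexError: paths containing no '.'.
def Pre_check_extension (path : String) : Prop := PySem.Str.isIn "." path = true
instance (path : String) : Decidable (Pre_check_extension path) := by unfold Pre_check_extension; infer_instance

def pvWitness_check_extension : String := "a.txt"

def Spec_check_extension (path : String) (out : String) : Prop := out = check_extension_alt path
instance (path : String) (out : String) : Decidable (Spec_check_extension path out) := by unfold Spec_check_extension; infer_instance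

-- ===== CLAIM (what is proved, stated in full; the proofs are below) =====
def Claim_equal_check_extension : Prop := ∀ (path : String), Dom_check_extension path → Pre_check_extension path → Spec_check_extension path (check_extension path)

-- ===== LEMMAS AND PROOFS =====

-- Any '.'-containing list splits as pre ++ '.' :: suf with no dot in suf (last occurrence).
theorem exists_last_dot (cs : List Char) (h : '.' ∈ cs) :
    ∃ pre suf, cs = pre ++ '.' :: suf ∧ '.' ∉ suf := by
  induction cs with
  | nil => cases h
  | cons c rest ih =>
    by_cases hr : '.' ∈ rest
    · obtain ⟨pre, suf, hcs, hns⟩ := ih hr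
      exact ⟨c :: pre, suf, by simp [hcs], hns⟩
    · have hc : c = '.' := by
        rcases List.mem_cons.mp h with h | h
        · exact h.symm
        · exact absurd h hr
      exact ⟨[], rest, by simp [hc], hr⟩

theorem checkExtGo_spec (sr : List Char) (rest acc : List Char) (h : '.' ∉ sr) :
    checkExtGo (sr ++ '.' :: rest) acc = sr.reverse ++ acc := by
  induction sr generalizing acc with
  | nil => simp [checkExtGo]
  | cons c cs ih =>
    simp only [List.mem_cons, not_or] at h
    have hc : ¬ c = '.' := fun hc => h.1 hc.symm
    simp only [List.cons_append, checkExtGo, hc, if_false]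
    rw [ih (c :: acc) h.2]
    simp

theorem rfind_go_last (pre suf : List Char) (h : '.' ∉ suf) :
    ∀ n, pre.length ≤ n →
      PySem.Chars.rfind.go (pre ++ '.' :: suf) ['.'] n = (pre.length : Int) := by
  intro n
  induction n with
  | zero =>
    intro hn
    have hp : pre = [] := List.eq_nil_of_length_eq_zero (Nat.le_zero.mp hn)
    subst hp
    simp [PySem.Chars.rfind.go, List.isPrefixOf]
  | succ m ih =>
    intro hn
    rcases Nat.lt_or_ge m pre.length with hlt | hge
    · -- pre.length = m + 1 : the dot is exactly at index m+1... i.e. drop (m+1) starts with '.'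
      have hpe : pre.length = m + 1 := by omega
      have hdrop : List.drop (m + 1) (pre ++ '.' :: suf) = '.' :: suf := by
        rw [← hpe, List.drop_left]
      simp [PySem.Chars.rfind.go, hdrop, List.isPrefixOf, hpe]
    · -- index m+1 is inside suf (or past the end): no dot there, recurse
      have hdrop : List.drop (m + 1) (pre ++ '.' :: suf)
          = List.drop (m - pre.length) suf := by
        rw [List.drop_append]
        have h1 : List.drop (m + 1) pre = [] := List.drop_eq_nil_of_le (by omega)
        have h2 : m + 1 - pre.length = (m - pre.length) + 1 := by omega
        rw [h1, h2]
        simp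
      have hnp : ['.'].isPrefixOf (List.drop (m + 1) (pre ++ '.' :: suf)) = false := by
        rw [hdrop]
        cases hd : List.drop (m - pre.length) suf with
        | nil => simp [List.isPrefixOf]
        | cons x xs =>
          have hx : x ∈ suf := by
            have : x ∈ List.drop (m - pre.length) suf := by rw [hd]; exact List.mem_cons_self
            exact List.mem_of_mem_drop this
          have hxne : ¬ x = '.' := fun hx' => h (hx' ▸ hx)
          simp [List.isPrefixOf]
          exact fun h' => hxne h'.symm
      simp only [PySem.Chars.rfind.go]
      rw [hnp]
      simp only [Bool.false_eq_true, if_false]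
      exact ih hge

theorem rfind_last (pre suf : List Char) (h : '.' ∉ suf) :
    PySem.Chars.rfind (pre ++ '.' :: suf) ['.'] = (pre.length : Int) := by
  unfold PySem.Chars.rfind
  exact rfind_go_last pre suf h _ (by simp)

-- ===== VERDICT (by name: the statement is the Claim_ definition above) =====
theorem check_extension_spec : Claim_equal_check_extension := by
  intro path _hdom hpre
  unfold Spec_check_extension
  have hmem : '.' ∈ path.toList := by
    obtain ⟨s, t, hst⟩ := (PySem.Str.isIn_iff_infix "." path).mp hpre
    have hd : '.' ∈ (".".toList : List Char) := by decide
    rw [← hst]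
    exact List.mem_append.mpr (Or.inl (List.mem_append.mpr (Or.inr hd)))
  obtain ⟨pre, suf, hcs, hns⟩ := exists_last_dot path.toList hmem
  -- A side
  have hA : check_extension path = String.mk suf := by
    unfold check_extension
    rw [hcs]
    have hrev : (pre ++ '.' :: suf).reverse = suf.reverse ++ '.' :: pre.reverse := by
      simp
    rw [hrev, checkExtGo_spec suf.reverse pre.reverse [] (by simpa using hns)]
    simp
  -- B side
  have hB : check_extension_alt path = String.mk suf := by
    unfold check_extension_alt
    rw [PySem.Str.rfind_eq]
    have hdl : ".".toList = ['.'] := rfl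
    rw [hdl, hcs, rfind_last pre suf hns]
    have hnn : (0 : Int) ≤ (pre.length : Int) + 1 := by positivity
    rw [PySem.List.slice_from _ hnn]
    have ht : ((pre.length : Int) + 1).toNat = pre.length + 1 := by omega
    rw [ht]
    have : pre ++ '.' :: suf = (pre ++ ['.']) ++ suf := by simp
    rw [this]
    have h2 : pre.length + 1 = (pre ++ ['.']).length := by simp
    rw [h2, List.drop_left]
  rw [hA, hB]
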